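-- pv_equiv track=rewrite | github.com/jdtully/learning_python | lowest_multiple_number_done.py | tabulate_occurences
-- ===== SOURCE A (Python) =====
-- def tabulate_occurences(factorizations_exp):
--     biggest_exp=dict()
--     for num,factorization in factorizations_exp.items():
--         for p,e in factorization.items():
--             if p in biggest_exp:
--                 if biggest_exp[p]<e:
--                     biggest_exp[p]=e
--             else:
--                 biggest_exp[p]=e
--
--     return biggest_exp
-- ===== SOURCE B (Python) =====
-- def tabulate_occurences(factorizations_exp):
--     # Gather-then-reduce: collect every exponent per prime, then take each max.
--     grouped = {}
--     for factorization in factorizations_exp.values():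
--         for p, e in factorization.items():
--             grouped.setdefault(p, []).append(e)
--     return {p: max(es) for p, es in grouped.items()}
-- ===== Notes on version B (the rewrite author's own statement) =====
-- stated objective: alternative
-- what changed: Replaces A's online running-max dict update with a two-phase gather-then-reduce: one pass groups all exponents per prime into lists (setdefault/append), then a dict comprehension reduces each list with max; first-encounter key order is preserved.
import Mathlib
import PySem

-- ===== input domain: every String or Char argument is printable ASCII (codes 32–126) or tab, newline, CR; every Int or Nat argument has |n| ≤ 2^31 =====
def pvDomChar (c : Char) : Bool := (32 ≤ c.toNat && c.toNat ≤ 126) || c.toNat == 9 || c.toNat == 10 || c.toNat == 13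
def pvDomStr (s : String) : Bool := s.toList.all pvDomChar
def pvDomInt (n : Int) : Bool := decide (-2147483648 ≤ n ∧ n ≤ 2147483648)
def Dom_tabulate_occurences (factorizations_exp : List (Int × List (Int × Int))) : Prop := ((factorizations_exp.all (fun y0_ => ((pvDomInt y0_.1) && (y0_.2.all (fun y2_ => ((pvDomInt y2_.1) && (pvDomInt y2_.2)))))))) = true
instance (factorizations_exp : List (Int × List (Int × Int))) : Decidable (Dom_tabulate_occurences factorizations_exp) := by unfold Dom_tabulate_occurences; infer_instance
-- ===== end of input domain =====

-- B replaces A's online running-max update with a gather-then-reduce decomposition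
-- (group all exponents per prime, then take each list's max); objective: alternative, same cost.

-- ===== PORT A =====
-- one loop step of A: update the running-max dict with one (p, e) pair
def tabStepA (d : PySem.Dict Int Int) (pe : Int × Int) : PySem.Dict Int Int :=
  if d.contains pe.1 then
    (if d.getD pe.1 0 < pe.2 then d.insert pe.1 pe.2 else d)
  else d.insert pe.1 pe.2

def tabulate_occurences (factorizations_exp : List (Int × List (Int × Int))) : List (Int × Int) :=
  (factorizations_exp.foldl
    (fun biggest_exp numfact => numfact.2.foldl tabStepA biggest_exp)
    PySem.Dict.empty).items

-- ===== PORT B =====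
-- grouped.setdefault(p, []).append(e) : in-place append == store (old list ++ [e]) at p
def tabStepB (g : PySem.Dict Int (List Int)) (pe : Int × Int) : PySem.Dict Int (List Int) :=
  g.modify pe.1 [] (· ++ [pe.2])

-- {p: max(es) …}: es is always nonempty, so max(es) = (max? es).getD 0 exactly
def tabReduce (pes : Int × List Int) : Int × Int :=
  (pes.1, (PySem.List.max? pes.2 id).getD 0)

def tabulate_occurences_alt (factorizations_exp : List (Int × List (Int × Int))) : List (Int × Int) :=
  let grouped := factorizations_exp.foldl
    (fun g numfact => numfact.2.foldl tabStepB g) PySem.Dict.empty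
  grouped.items.map tabReduce

-- ===== PRECONDITION & SPEC =====
def Spec_tabulate_occurences (factorizations_exp : List (Int × List (Int × Int))) (out : List (Int × Int)) : Prop := out = tabulate_occurences_alt factorizations_exp
instance (factorizations_exp : List (Int × List (Int × Int))) (out : List (Int × Int)) : Decidable (Spec_tabulate_occurences factorizations_exp out) := by unfold Spec_tabulate_occurences; infer_instance

-- ===== CLAIM (what is proved, stated in full; the proofs are below) =====
def Claim_equal_tabulate_occurences : Prop := ∀ (factorizations_exp : List (Int × List (Int × Int))), Dom_tabulate_occurences factorizations_exp → Spec_tabulate_occurences factorizations_exp (tabulate_occurences factorizations_exp)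

-- ===== LEMMAS AND PROOFS =====

-- the invariant relating A's running-max dict to B's dict of exponent lists
def tabInv (d : PySem.Dict Int Int) (g : PySem.Dict Int (List Int)) : Prop :=
  d.items = g.items.map tabReduce ∧ g.keys.Nodup ∧ ∀ q ∈ g.items, q.2 ≠ []

-- the fold step of PySem.List.max? with key = id, named so we can induct on it
def tabMaxStep : Option Int → Int → Option Int :=
  fun acc x => match acc with
    | none => some x
    | some m => if m < x then some x else some m

lemma max?_eq_foldl (es : List Int) :
    PySem.List.max? es id = es.foldl tabMaxStep none := by
  simp only [PySem.List.max?]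
  congr 1
  funext acc x
  cases acc <;> rfl

lemma foldl_tabMaxStep_some (t : List Int) (a : Int) :
    ∃ m, t.foldl tabMaxStep (some a) = some m := by
  induction t generalizing a with
  | nil => exact ⟨a, rfl⟩
  | cons x t ih =>
    simp only [List.foldl_cons, tabMaxStep]
    split <;> exact ih _

lemma max?_some_of_ne_nil (es : List Int) (h : es ≠ []) :
    ∃ m, PySem.List.max? es id = some m := by
  cases es with
  | nil => exact absurd rfl h
  | cons a t => rw [max?_eq_foldl]; exact foldl_tabMaxStep_some t a

lemma max?_append_singleton (es : List Int) (e : Int) {m : Int}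
    (hm : PySem.List.max? es id = some m) :
    PySem.List.max? (es ++ [e]) id = some (if m < e then e else m) := by
  rw [max?_eq_foldl] at hm ⊢
  rw [List.foldl_append, hm]
  simp only [List.foldl_cons, List.foldl_nil, tabMaxStep]
  split <;> rfl

lemma max?_singleton (e : Int) : PySem.List.max? [e] id = some e := rfl

lemma tabInv_keys {d : PySem.Dict Int Int} {g : PySem.Dict Int (List Int)}
    (h : d.items = g.items.map tabReduce) : d.keys = g.keys := by
  simp only [PySem.Dict.keys, h, List.map_map]
  rfl

lemma tabInv_contains {d : PySem.Dict Int Int} {g : PySem.Dict Int (List Int)}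
    (h : d.items = g.items.map tabReduce) (k : Int) : d.contains k = g.contains k := by
  rw [PySem.Dict.contains_eq_decide_mem_keys, PySem.Dict.contains_eq_decide_mem_keys,
    tabInv_keys h]

lemma tabInv_step {d : PySem.Dict Int Int} {g : PySem.Dict Int (List Int)}
    (h : tabInv d g) (pe : Int × Int) : tabInv (tabStepA d pe) (tabStepB g pe) := by
  obtain ⟨hi, hnd, hne⟩ := h
  obtain ⟨p, e⟩ := pe
  by_cases hc : g.contains p = true
  · -- p already present: g appends e to its stored list, A updates its running max
    have hpk : p ∈ g.keys := (PySem.Dict.contains_iff_mem_keys g p).1 hc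
    simp only [PySem.Dict.keys] at hpk
    obtain ⟨⟨p1, es⟩, hq, hq1⟩ := List.mem_map.1 hpk
    dsimp at hq1
    subst hq1
    have hgp : g.get? p1 = some es := PySem.Dict.get?_of_mem_items g hq hnd
    have hges : g.getD p1 [] = es := PySem.Dict.getD_of_mem_items g hq hnd []
    have hdmem : (p1, (PySem.List.max? es id).getD 0) ∈ d.items := by
      rw [hi]; exact List.mem_map.2 ⟨(p1, es), hq, rfl⟩
    have hdnd : d.keys.Nodup := by rw [tabInv_keys hi]; exact hnd
    have hdget : d.getD p1 0 = (PySem.List.max? es id).getD 0 :=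
      PySem.Dict.getD_of_mem_items d hdmem hdnd 0
    obtain ⟨m, hm⟩ := max?_some_of_ne_nil es (hne _ hq)
    have hdc : d.contains p1 = true := by rw [tabInv_contains hi]; exact hc
    have hgup : (tabStepB g (p1, e)).items
        = g.items.map (fun q => if q.1 == p1 then (p1, es ++ [e]) else q) := by
      simp only [tabStepB, PySem.Dict.modify, hges]
      exact PySem.Dict.items_insert_of_contains g (es ++ [e]) hc
    have hrednew : tabReduce (p1, es ++ [e]) = (p1, if m < e then e else m) := by
      simp [tabReduce, max?_append_singleton es e hm]
    refine ⟨?_, ?_, ?_⟩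
    · by_cases hlt : d.getD p1 0 < e
      · have hde : (tabStepA d (p1, e)).items
            = d.items.map (fun q => if q.1 == p1 then (p1, e) else q) := by
          simp only [tabStepA, hdc, if_pos, hlt]
          exact PySem.Dict.items_insert_of_contains d e hdc
        rw [hde, hgup, hi, List.map_map, List.map_map]
        apply List.map_congr_left
        intro q hqmem
        by_cases hq1 : (q.1 == p1) = true
        · have hme : m < e := by rw [hdget, hm] at hlt; simpa using hlt
          simp [Function.comp, tabReduce, hq1, max?_append_singleton es e hm, hme]
        · simp [Function.comp, tabReduce, hq1]
      · have hde : (tabStepA d (p1, e)).items = d.items := by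
          simp [tabStepA, hdc, hlt]
        rw [hde, hgup, hi, List.map_map]
        apply List.map_congr_left
        intro q hqmem
        by_cases hq1 : (q.1 == p1) = true
        · have hqp : q.1 = p1 := by simpa using hq1
          have hq2 : q.2 = es := by
            have hmem' : (q.1, q.2) ∈ g.items := by simpa using hqmem
            have := PySem.Dict.get?_of_mem_items g hmem' hnd
            rw [hqp, hgp] at this
            exact (Option.some.inj this).symm
          have hnlt : ¬ m < e := by rw [hdget, hm] at hlt; simpa using hlt
          have hq' : q = (p1, es) := by
            cases q; simp_all
          simp only [Function.comp, hq1, if_pos, hrednew, if_neg hnlt]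
          rw [hq']
          simp [tabReduce, hm]
        · simp [Function.comp, hq1]
    · have : (tabStepB g (p1, e)).keys = g.keys := by
        simp only [tabStepB, PySem.Dict.modify]
        exact PySem.Dict.keys_insert_of_contains g _ hc
      rw [this]; exact hnd
    · intro q hqm
      rw [hgup] at hqm
      obtain ⟨q0, hq0, hq0e⟩ := List.mem_map.1 hqm
      by_cases h1 : (q0.1 == p1) = true
      · simp only [h1, if_pos] at hq0e; subst hq0e; simp
      · simp only [h1, Bool.false_eq_true] at hq0e
        subst hq0e; exact hne q0 hq0
  · -- fresh key: both dicts append a new entry at the end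
    have hc' : g.contains p = false := by simpa using hc
    have hdc : d.contains p = false := by rw [tabInv_contains hi]; exact hc'
    have hgd : g.getD p [] = [] := PySem.Dict.getD_of_not_contains g [] hc'
    have hgup : (tabStepB g (p, e)).items = g.items ++ [(p, [e])] := by
      simp only [tabStepB, PySem.Dict.modify, hgd]
      simpa using PySem.Dict.items_insert_of_not_contains g [e] hc'
    have hde : (tabStepA d (p, e)).items = d.items ++ [(p, e)] := by
      simp only [tabStepA, hdc, Bool.false_eq_true, if_false]
      exact PySem.Dict.items_insert_of_not_contains d e hdc
    refine ⟨?_, ?_, ?_⟩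
    · rw [hde, hgup, hi, List.map_append]
      simp [tabReduce, max?_singleton]
    · have : (tabStepB g (p, e)).keys = g.keys ++ [p] := by
        simp only [tabStepB, PySem.Dict.modify]
        exact PySem.Dict.keys_insert_of_not_contains g _ hc'
      rw [this]
      have hp : p ∉ g.keys := fun hmem => by
        have hcm := (PySem.Dict.contains_iff_mem_keys g p).2 hmem
        rw [hc'] at hcm; exact Bool.noConfusion hcm
      simp only [List.nodup_append, List.nodup_singleton, true_and]
      refine ⟨hnd, ?_⟩
      intro a ha b hb hab
      simp only [List.mem_singleton] at hb
      exact hp ((hb ▸ hab) ▸ ha)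
    · intro q hqm
      rw [hgup] at hqm
      rcases List.mem_append.1 hqm with h | h
      · exact hne q h
      · simp only [List.mem_singleton] at h; subst h; simp
  
lemma tabInv_foldl (L : List (Int × Int)) :
    ∀ {d : PySem.Dict Int Int} {g : PySem.Dict Int (List Int)}, tabInv d g →
      tabInv (L.foldl tabStepA d) (L.foldl tabStepB g) := by
  induction L with
  | nil => intro d g h; exact h
  | cons x t ih => intro d g h; exact ih (tabInv_step h x)

lemma tab_foldl_flat {α : Type} (step : α → (Int × Int) → α)
    (fe : List (Int × List (Int × Int))) (a : α) :
    fe.foldl (fun acc numfact => numfact.2.foldl step acc) a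
      = (fe.flatMap (·.2)).foldl step a := by
  induction fe generalizing a with
  | nil => rfl
  | cons x t ih => simp [List.flatMap_cons, List.foldl_append, ih]

-- ===== VERDICT (by name: the statement is the Claim_ definition above) =====
theorem tabulate_occurences_spec : Claim_equal_tabulate_occurences := by
  intro fe _
  unfold Spec_tabulate_occurences tabulate_occurences tabulate_occurences_alt
  rw [tab_foldl_flat tabStepA, tab_foldl_flat tabStepB]
  have h0 : tabInv PySem.Dict.empty PySem.Dict.empty := by
    refine ⟨rfl, PySem.Dict.nodup_keys_empty, by intro q hq; cases hq⟩
  exact (tabInv_foldl (fe.flatMap (·.2)) h0).1
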